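-- pv_equiv track=rewrite | github.com/LucianoBDN/python_practica | Arrays/matrices/Practica_matrices/Package_Input/Generales.py | calcular_recaudacion_por_coches
-- ===== SOURCE A (Python) =====
-- def calcular_recaudacion_por_coches(lista: list):
--     recaudacion_coche_1 = 0
--     recaudacion_coche_2 = 0
--     recaudacion_coche_3 = 0
--     recaudacion_coche_4 = 0
--     recaudacion_coche_5 = 0
--
--
--     for i in range(len(lista)):
--         if lista[i][1] == 1:
--             recaudacion_coche_1 += lista[i][2]
--         elif lista[i][1] == 2:
--             recaudacion_coche_2 += lista[i][2]
--         elif lista[i][1] == 3: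
--             recaudacion_coche_3 += lista[i][2]
--         elif lista[i][1] == 4:
--             recaudacion_coche_4 += lista[i][2]
--         else:
--             recaudacion_coche_5 += lista[i][2]
--
--     recaudacion_coche =[recaudacion_coche_1, recaudacion_coche_2, recaudacion_coche_3, recaudacion_coche_4, recaudacion_coche_5]
--
--     return recaudacion_coche
-- ===== SOURCE B (Python) =====
-- def calcular_recaudacion_por_coches(lista: list):
--     s1 = sum(row[2] for row in lista if row[1] == 1)
--     s2 = sum(row[2] for row in lista if row[1] == 2)
--     s3 = sum(row[2] for row in lista if row[1] == 3)
--     s4 = sum(row[2] for row in lista if row[1] == 4)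
--     total = sum(row[2] for row in lista)
--     return [s1, s2, s3, s4, total - s1 - s2 - s3 - s4]
-- ===== Notes on version B (the rewrite author's own statement) =====
-- stated objective: alternative
-- what changed: Replaces the single loop with five scalar accumulators and a 5-way if/elif chain by per-bucket filtered sums for cars 1-4 plus a grand total, computing the catch-all 5th bucket by subtraction instead of an else branch.
import Mathlib
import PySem

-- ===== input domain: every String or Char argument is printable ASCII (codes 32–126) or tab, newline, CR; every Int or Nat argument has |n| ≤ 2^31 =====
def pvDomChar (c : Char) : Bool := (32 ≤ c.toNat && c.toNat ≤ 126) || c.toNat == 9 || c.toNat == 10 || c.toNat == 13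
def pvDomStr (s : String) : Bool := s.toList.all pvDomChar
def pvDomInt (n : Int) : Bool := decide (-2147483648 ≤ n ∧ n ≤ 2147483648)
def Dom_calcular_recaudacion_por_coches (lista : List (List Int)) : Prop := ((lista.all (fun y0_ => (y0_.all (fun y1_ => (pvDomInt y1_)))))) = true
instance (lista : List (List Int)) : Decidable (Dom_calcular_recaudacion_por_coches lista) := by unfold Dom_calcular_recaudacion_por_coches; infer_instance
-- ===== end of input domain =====

-- B replaces A's single loop with five scalar accumulators and a 5-way if/elif chain by
-- per-bucket filtered sums (buckets 1-4) plus a total, deriving bucket 5 by subtraction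
-- (objective: alternative decomposition; return value proved equal on Pre_).

-- ===== PORT A =====
def pvStepA (acc : Int × Int × Int × Int × Int) (row : List Int) : Int × Int × Int × Int × Int :=
  let c := PySem.List.pyGetD row 1 0
  let v := PySem.List.pyGetD row 2 0
  if c = 1 then (acc.1 + v, acc.2.1, acc.2.2.1, acc.2.2.2.1, acc.2.2.2.2)
  else if c = 2 then (acc.1, acc.2.1 + v, acc.2.2.1, acc.2.2.2.1, acc.2.2.2.2)
  else if c = 3 then (acc.1, acc.2.1, acc.2.2.1 + v, acc.2.2.2.1, acc.2.2.2.2)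
  else if c = 4 then (acc.1, acc.2.1, acc.2.2.1, acc.2.2.2.1 + v, acc.2.2.2.2)
  else (acc.1, acc.2.1, acc.2.2.1, acc.2.2.2.1, acc.2.2.2.2 + v)

def calcular_recaudacion_por_coches (lista : List (List Int)) : List Int :=
  let r := (PySem.List.pyRange 0 (lista.length : Int) 1).foldl
    (fun acc i => pvStepA acc (PySem.List.pyGetD lista i [])) (0, 0, 0, 0, 0)
  [r.1, r.2.1, r.2.2.1, r.2.2.2.1, r.2.2.2.2]

-- ===== PORT B =====
def pvBucket (lista : List (List Int)) (k : Int) : Int :=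
  ((lista.filter (fun row => PySem.List.pyGetD row 1 0 == k)).map
    (fun row => PySem.List.pyGetD row 2 0)).sum

def calcular_recaudacion_por_coches_alt (lista : List (List Int)) : List Int :=
  let s1 := pvBucket lista 1
  let s2 := pvBucket lista 2
  let s3 := pvBucket lista 3
  let s4 := pvBucket lista 4
  let total := (lista.map (fun row => PySem.List.pyGetD row 2 0)).sum
  [s1, s2, s3, s4, total - s1 - s2 - s3 - s4]

-- ===== PRECONDITION & SPEC =====
-- A indexes row[1] and row[2] on every iteration, so it raises IndexError on any row
-- shorter than 3 elements; Pre_ excludes exactly those inputs.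
def Pre_calcular_recaudacion_por_coches (lista : List (List Int)) : Prop :=
  ∀ row ∈ lista, 3 ≤ row.length
instance (lista : List (List Int)) : Decidable (Pre_calcular_recaudacion_por_coches lista) := by
  unfold Pre_calcular_recaudacion_por_coches; infer_instance
def pvWitness_calcular_recaudacion_por_coches : List (List Int) := [[10, 1, 5], [11, 7, 3], [12, 2, 4]]
def Spec_calcular_recaudacion_por_coches (lista : List (List Int)) (out : List Int) : Prop := out = calcular_recaudacion_por_coches_alt lista
instance (lista : List (List Int)) (out : List Int) : Decidable (Spec_calcular_recaudacion_por_coches lista out) := by unfold Spec_calcular_recaudacion_por_coches; infer_instance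

-- ===== CLAIM (what is proved, stated in full; the proofs are below) =====
def Claim_equal_calcular_recaudacion_por_coches : Prop := ∀ (lista : List (List Int)), Dom_calcular_recaudacion_por_coches lista → Pre_calcular_recaudacion_por_coches lista → Spec_calcular_recaudacion_por_coches lista (calcular_recaudacion_por_coches lista)

-- ===== LEMMAS AND PROOFS =====

theorem pvBucket_cons (row : List Int) (rest : List (List Int)) (k : Int) :
    pvBucket (row :: rest) k =
      (if PySem.List.pyGetD row 1 0 = k then PySem.List.pyGetD row 2 0 else 0) + pvBucket rest k := by
  by_cases h : PySem.List.pyGetD row 1 0 = k <;>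
    simp [pvBucket, h]

theorem pvLoopA_eq (lista : List (List Int)) :
    ∀ a1 a2 a3 a4 a5 : Int,
      lista.foldl pvStepA (a1, a2, a3, a4, a5) =
        (a1 + pvBucket lista 1, a2 + pvBucket lista 2, a3 + pvBucket lista 3,
         a4 + pvBucket lista 4,
         a5 + ((lista.map (fun row => PySem.List.pyGetD row 2 0)).sum
                - pvBucket lista 1 - pvBucket lista 2 - pvBucket lista 3 - pvBucket lista 4)) := by
  induction lista with
  | nil => intro a1 a2 a3 a4 a5; simp [pvBucket]
  | cons row rest ih =>
    intro a1 a2 a3 a4 a5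
    simp only [List.foldl_cons, List.map_cons, List.sum_cons,
      pvBucket_cons, pvStepA]
    by_cases h1 : PySem.List.pyGetD row 1 0 = 1 <;>
      by_cases h2 : PySem.List.pyGetD row 1 0 = 2 <;>
        by_cases h3 : PySem.List.pyGetD row 1 0 = 3 <;>
          by_cases h4 : PySem.List.pyGetD row 1 0 = 4 <;>
            simp only [h1, h2, h3, h4, if_false, if_pos, ih] <;>
            · refine Prod.ext ?_ (Prod.ext ?_ (Prod.ext ?_ (Prod.ext ?_ ?_))) <;> simp <;> ring

-- ===== VERDICT (by name: the statement is the Claim_ definition above) =====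
theorem calcular_recaudacion_por_coches_spec : Claim_equal_calcular_recaudacion_por_coches := by
  intro lista _ _
  unfold Spec_calcular_recaudacion_por_coches calcular_recaudacion_por_coches
    calcular_recaudacion_por_coches_alt
  rw [PySem.List.foldl_pyRange_zero_pyGetD' lista [] pvStepA (0, 0, 0, 0, 0)]
  rw [pvLoopA_eq]
  simp
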